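-- pv_equiv track=rewrite | github.com/tanvirEfti/CSE-221 | Lab-04/Task-06/task6.py | countdiamonds
-- ===== SOURCE A (Python) =====
-- def DFS_FloodFill(r, c, rows, cols, lst):
--     if r < 0 or r >= rows or c < 0 or c >= cols or lst[r][c] == '#':
--         return 0
--
--     count = 0
--     if lst[r][c] == 'D':
--         count += 1
--
--     lst[r][c] = '#'
--
--     count += DFS_FloodFill(r + 1, c, rows, cols, lst)
--     count += DFS_FloodFill(r - 1, c, rows, cols, lst)
--     count += DFS_FloodFill(r, c + 1, rows, cols, lst)
--     count += DFS_FloodFill(r, c - 1, rows, cols, lst)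
--
--     return count
--
-- def countdiamonds(rows, cols, lst):
--     maxDiamonds = 0
--     for r in range(rows):
--         for c in range(cols):
--             if lst[r][c] == '.':
--                 diamond = DFS_FloodFill(r, c, rows, cols, lst)
--                 maxDiamonds = max(maxDiamonds, diamond)
--     return maxDiamonds
-- ===== SOURCE B (Python) =====
-- def countdiamonds(rows, cols, lst):
--     best = 0
--     for r in range(rows):
--         for c in range(cols):
--             if lst[r][c] == '.':
--                 cnt = 0
--                 stack = [(r, c)]
--                 while stack:
--                     rr, cc = stack.pop()
--                     if rr < 0 or rr >= rows or cc < 0 or cc >= cols or lst[rr][cc] == '#':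
--                         continue
--                     if lst[rr][cc] == 'D':
--                         cnt += 1
--                     lst[rr][cc] = '#'
--                     stack.append((rr, cc - 1))
--                     stack.append((rr, cc + 1))
--                     stack.append((rr - 1, cc))
--                     stack.append((rr + 1, cc))
--                 if cnt > best:
--                     best = cnt
--     return best
-- ===== Notes on version B (the rewrite author's own statement) =====
-- stated objective: alternative
-- what changed: the recursive four-way DFS_FloodFill helper is replaced by an in-line iterative flood fill with an explicit stack (push the seed, pop cells, skip visited/out-of-bounds, mark and push neighbours), so no recursion and no helper function; the running max is kept with a comparison instead of max()
import Mathlib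
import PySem

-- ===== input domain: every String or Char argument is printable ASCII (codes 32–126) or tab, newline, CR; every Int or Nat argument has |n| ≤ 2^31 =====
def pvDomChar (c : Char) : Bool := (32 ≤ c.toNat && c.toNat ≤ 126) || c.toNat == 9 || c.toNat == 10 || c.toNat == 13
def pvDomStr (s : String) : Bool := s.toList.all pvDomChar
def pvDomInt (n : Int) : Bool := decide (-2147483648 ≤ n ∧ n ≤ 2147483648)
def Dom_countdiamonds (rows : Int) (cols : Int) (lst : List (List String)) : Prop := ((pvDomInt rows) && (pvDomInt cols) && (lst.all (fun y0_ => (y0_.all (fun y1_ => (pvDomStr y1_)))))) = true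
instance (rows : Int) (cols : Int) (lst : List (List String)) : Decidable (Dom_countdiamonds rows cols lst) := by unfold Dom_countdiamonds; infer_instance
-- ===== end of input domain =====

-- B replaces the recursive DFS flood fill by an iterative explicit-stack flood fill (alternative
-- decomposition, same cost).  Both Pythons mutate lst in place identically; the theorem is about
-- the return value.

-- ===== PORT A =====
-- grid read lst[r][c]: exact for in-range indices (all reads are guarded by 0 ≤ r < rows,
-- 0 ≤ c < cols, and Pre_ puts those inside the actual lists); the default "#" outside the
-- actual lists is only a totalisation device, never reached under Pre_.
def pvGet (g : List (List String)) (r c : Int) : String := (g.getD r.toNat []).getD c.toNat "#"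

-- grid write lst[r][c] = v (in-place mutation modelled functionally)
def pvSet (g : List (List String)) (r c : Int) (v : String) : List (List String) :=
  g.modify r.toNat (fun row => row.set c.toNat v)

-- termination measure: number of non-'#' entries in the grid
def pvCells (g : List (List String)) : Nat :=
  (g.map (fun row => row.countP (fun s => s ≠ "#"))).sum

theorem countP_set_lt (l : List String) (j : Nat) (h : l.getD j "#" ≠ "#") :
    (l.set j "#").countP (fun s => decide (s ≠ "#")) < l.countP (fun s => decide (s ≠ "#")) := by
  induction l generalizing j with
  | nil => simp [List.getD] at h
  | cons a t ih =>
    cases j with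
    | zero =>
      simp only [List.getD_cons_zero] at h
      simp [h]
    | succ j =>
      simp only [List.getD_cons_succ] at h
      simp only [List.set_cons_succ, List.countP_cons]
      have := ih j h
      omega

theorem cells_modify_lt (g : List (List String)) (i : Nat) (j : Nat)
    (h : (g.getD i []).getD j "#" ≠ "#") :
    pvCells (g.modify i (fun row => row.set j "#")) < pvCells g := by
  induction g generalizing i with
  | nil => simp [List.getD] at h
  | cons a t ih =>
    cases i with
    | zero =>
      simp only [List.getD_cons_zero] at h
      simp only [pvCells, List.modify_cons, if_true, eq_self_iff_true, List.map_cons,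
        List.sum_cons]
      have := countP_set_lt a j h
      omega
    | succ i =>
      simp only [List.getD_cons_succ] at h
      have := ih i h
      simp only [pvCells, List.modify_cons, Nat.succ_ne_zero, if_false, List.map_cons,
        List.sum_cons, Nat.add_sub_cancel] at this ⊢
      omega

theorem pvCells_set_lt (g : List (List String)) (r c : Int)
    (h : pvGet g r c ≠ "#") : pvCells (pvSet g r c "#") < pvCells g :=
  cells_modify_lt g r.toNat c.toNat h

-- literal transliteration of DFS_FloodFill; the subtype records that flooding never
-- increases pvCells, which the nested recursive calls need for termination.
def dfsA (rows cols r c : Int) (g : List (List String)) :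
    {res : Int × List (List String) // pvCells res.2 ≤ pvCells g} :=
  if h : r < 0 ∨ r ≥ rows ∨ c < 0 ∨ c ≥ cols ∨ pvGet g r c = "#" then
    ⟨(0, g), le_refl _⟩
  else
    let cnt : Int := if pvGet g r c = "D" then 1 else 0
    have hne : pvGet g r c ≠ "#" := by push_neg at h; exact h.2.2.2.2
    have h0 : pvCells (pvSet g r c "#") < pvCells g := pvCells_set_lt g r c hne
    match dfsA rows cols (r + 1) c (pvSet g r c "#") with
    | ⟨(c1, g1), p1⟩ =>
      match dfsA rows cols (r - 1) c g1 with
      | ⟨(c2, g2), p2⟩ =>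
        match dfsA rows cols r (c + 1) g2 with
        | ⟨(c3, g3), p3⟩ =>
          match dfsA rows cols r (c - 1) g3 with
          | ⟨(c4, g4), p4⟩ =>
            ⟨(cnt + c1 + c2 + c3 + c4, g4),
              le_trans p4 (le_trans p3 (le_trans p2 (le_trans p1 (le_of_lt h0))))⟩
termination_by pvCells g
decreasing_by
  · exact h0
  · exact lt_of_le_of_lt p1 h0
  · exact lt_of_le_of_lt (le_trans p2 p1) h0
  · exact lt_of_le_of_lt (le_trans p3 (le_trans p2 p1)) h0

def countdiamonds (rows : Int) (cols : Int) (lst : List (List String)) : Int :=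
  ((PySem.List.pyRange 0 rows 1).foldl (fun st r =>
    (PySem.List.pyRange 0 cols 1).foldl (fun (st : Int × List (List String)) c =>
      if pvGet st.2 r c = "." then
        let res := (dfsA rows cols r c st.2).val
        (max st.1 res.1, res.2)
      else st) st) ((0 : Int), lst)).1

-- ===== PORT B =====
-- iterative flood fill; Lean list head = top of the Python stack (append/pop() at the end)
def floodB (rows cols : Int) (g : List (List String)) (stack : List (Int × Int)) (acc : Int) :
    Int × List (List String) :=
  match stack with
  | [] => (acc, g)
  | (r, c) :: rest =>
    if h : r < 0 ∨ r ≥ rows ∨ c < 0 ∨ c ≥ cols ∨ pvGet g r c = "#" then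
      floodB rows cols g rest acc
    else
      have hne : pvGet g r c ≠ "#" := by push_neg at h; exact h.2.2.2.2
      have h0 : pvCells (pvSet g r c "#") < pvCells g := pvCells_set_lt g r c hne
      floodB rows cols (pvSet g r c "#")
        ((r + 1, c) :: (r - 1, c) :: (r, c + 1) :: (r, c - 1) :: rest)
        (if pvGet g r c = "D" then acc + 1 else acc)
termination_by (pvCells g, stack.length)
decreasing_by
  · exact Prod.Lex.right _ (by simp)
  · exact Prod.Lex.left _ _ h0

def countdiamonds_alt (rows : Int) (cols : Int) (lst : List (List String)) : Int :=
  ((PySem.List.pyRange 0 rows 1).foldl (fun st r =>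
    (PySem.List.pyRange 0 cols 1).foldl (fun (st : Int × List (List String)) c =>
      if pvGet st.2 r c = "." then
        let res := floodB rows cols st.2 [(r, c)] 0
        (if res.1 > st.1 then res.1 else st.1, res.2)
      else st) st) ((0 : Int), lst)).1

-- ===== PRECONDITION & SPEC =====
-- Pre_ excludes exactly the inputs where Python A raises IndexError: cols > 0 together with
-- rows exceeding len(lst) or some scanned row shorter than cols.
def Pre_countdiamonds (rows : Int) (cols : Int) (lst : List (List String)) : Prop :=
  cols ≤ 0 ∨ (rows.toNat ≤ lst.length ∧ ∀ row ∈ lst.take rows.toNat, cols.toNat ≤ row.length)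
instance (rows : Int) (cols : Int) (lst : List (List String)) : Decidable (Pre_countdiamonds rows cols lst) := by unfold Pre_countdiamonds; infer_instance

def pvWitness_countdiamonds : Int × Int × List (List String) :=
  (2, 3, [["D", ".", "#"], ["D", "D", "."]])

def Spec_countdiamonds (rows : Int) (cols : Int) (lst : List (List String)) (out : Int) : Prop := out = countdiamonds_alt rows cols lst
instance (rows : Int) (cols : Int) (lst : List (List String)) (out : Int) : Decidable (Spec_countdiamonds rows cols lst out) := by unfold Spec_countdiamonds; infer_instance

-- ===== CLAIM (what is proved, stated in full; the proofs are below) =====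
def Claim_equal_countdiamonds : Prop := ∀ (rows : Int) (cols : Int) (lst : List (List String)), Dom_countdiamonds rows cols lst → Pre_countdiamonds rows cols lst → Spec_countdiamonds rows cols lst (countdiamonds rows cols lst)

-- ===== LEMMAS AND PROOFS =====

-- one-step unfolding of the ports
theorem dfsA_invalid (rows cols r c : Int) (g : List (List String))
    (h : r < 0 ∨ r ≥ rows ∨ c < 0 ∨ c ≥ cols ∨ pvGet g r c = "#") :
    (dfsA rows cols r c g).val = (0, g) := by
  rw [dfsA, dif_pos h]

theorem dfsA_valid (rows cols r c : Int) (g : List (List String))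
    (h : ¬(r < 0 ∨ r ≥ rows ∨ c < 0 ∨ c ≥ cols ∨ pvGet g r c = "#")) :
    (dfsA rows cols r c g).val =
      ((if pvGet g r c = "D" then (1 : Int) else 0)
        + (dfsA rows cols (r + 1) c (pvSet g r c "#")).val.1
        + (dfsA rows cols (r - 1) c (dfsA rows cols (r + 1) c (pvSet g r c "#")).val.2).val.1
        + (dfsA rows cols r (c + 1) (dfsA rows cols (r - 1) c (dfsA rows cols (r + 1) c (pvSet g r c "#")).val.2).val.2).val.1
        + (dfsA rows cols r (c - 1) (dfsA rows cols r (c + 1) (dfsA rows cols (r - 1) c (dfsA rows cols (r + 1) c (pvSet g r c "#")).val.2).val.2).val.2).val.1,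
       (dfsA rows cols r (c - 1) (dfsA rows cols r (c + 1) (dfsA rows cols (r - 1) c (dfsA rows cols (r + 1) c (pvSet g r c "#")).val.2).val.2).val.2).val.2) := by
  conv_lhs => rw [dfsA]
  rw [dif_neg h]

theorem floodB_cons (rows cols r c : Int) (g : List (List String))
    (s : List (Int × Int)) (acc : Int) :
    floodB rows cols g ((r, c) :: s) acc =
      if r < 0 ∨ r ≥ rows ∨ c < 0 ∨ c ≥ cols ∨ pvGet g r c = "#" then
        floodB rows cols g s acc
      else
        floodB rows cols (pvSet g r c "#")
          ((r + 1, c) :: (r - 1, c) :: (r, c + 1) :: (r, c - 1) :: s)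
          (if pvGet g r c = "D" then acc + 1 else acc) := by
  conv_lhs => rw [floodB]
  split <;> rfl

theorem floodB_nil (rows cols : Int) (g : List (List String)) (acc : Int) :
    floodB rows cols g [] acc = (acc, g) := by
  rw [floodB]

-- the explicit-stack loop processes the top seed exactly like one recursive DFS call
theorem floodB_dfsA (rows cols : Int) :
    ∀ n (g : List (List String)), pvCells g ≤ n → ∀ r c s acc,
      floodB rows cols g ((r, c) :: s) acc =
      floodB rows cols (dfsA rows cols r c g).val.2 s (acc + (dfsA rows cols r c g).val.1) := by
  intro n
  induction n with
  | zero =>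
    intro g hg r c s acc
    have hcond : r < 0 ∨ r ≥ rows ∨ c < 0 ∨ c ≥ cols ∨ pvGet g r c = "#" := by
      by_contra hc
      have hne : pvGet g r c ≠ "#" := by push_neg at hc; exact hc.2.2.2.2
      have := pvCells_set_lt g r c hne
      omega
    rw [dfsA_invalid rows cols r c g hcond, floodB_cons, if_pos hcond]
    norm_num
  | succ n ih =>
    intro g hg r c s acc
    by_cases hcond : r < 0 ∨ r ≥ rows ∨ c < 0 ∨ c ≥ cols ∨ pvGet g r c = "#"
    · rw [dfsA_invalid rows cols r c g hcond, floodB_cons, if_pos hcond]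
      norm_num
    · have hne : pvGet g r c ≠ "#" := by push_neg at hcond; exact hcond.2.2.2.2
      have hlt := pvCells_set_lt g r c hne
      rw [floodB_cons, if_neg hcond]
      rw [ih _ (show pvCells (pvSet g r c "#") ≤ n by omega)]
      have q1 := (dfsA rows cols (r + 1) c (pvSet g r c "#")).property
      rw [ih _ (show pvCells (dfsA rows cols (r + 1) c (pvSet g r c "#")).val.2 ≤ n by omega)]
      have q2 := (dfsA rows cols (r - 1) c (dfsA rows cols (r + 1) c (pvSet g r c "#")).val.2).property
      rw [ih _ (show pvCells (dfsA rows cols (r - 1) c (dfsA rows cols (r + 1) c (pvSet g r c "#")).val.2).val.2 ≤ n by omega)]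
      have q3 := (dfsA rows cols r (c + 1) (dfsA rows cols (r - 1) c (dfsA rows cols (r + 1) c (pvSet g r c "#")).val.2).val.2).property
      rw [ih _ (show pvCells (dfsA rows cols r (c + 1) (dfsA rows cols (r - 1) c (dfsA rows cols (r + 1) c (pvSet g r c "#")).val.2).val.2).val.2 ≤ n by omega)]
      rw [dfsA_valid rows cols r c g hcond]
      congr 1
      by_cases hD : pvGet g r c = "D" <;> simp [hD] <;> ring

theorem floodB_single (rows cols r c : Int) (g : List (List String)) :
    floodB rows cols g [(r, c)] 0 = (dfsA rows cols r c g).val := by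
  rw [floodB_dfsA rows cols (pvCells g) g le_rfl r c [] 0, floodB_nil]
  simp

theorem pvFoldlExt {α β : Type} (f g : α → β → α) (h : ∀ a b, f a b = g a b) :
    ∀ (l : List β) (a : α), l.foldl f a = l.foldl g a := by
  intro l
  induction l with
  | nil => intro a; rfl
  | cons x t ih => intro a; simp only [List.foldl_cons, h, ih]

theorem countdiamonds_eq (rows cols : Int) (lst : List (List String)) :
    countdiamonds rows cols lst = countdiamonds_alt rows cols lst := by
  unfold countdiamonds countdiamonds_alt
  congr 1
  apply pvFoldlExt
  intro st r
  apply pvFoldlExt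
  intro st' c
  dsimp only
  by_cases hdot : pvGet st'.2 r c = "."
  · simp only [hdot, if_true, floodB_single]
    congr 1
    rw [max_def]
    split_ifs <;> omega
  · simp [hdot]

-- ===== VERDICT (by name: the statement is the Claim_ definition above) =====
theorem countdiamonds_spec : Claim_equal_countdiamonds := by
  intro rows cols lst _ _
  unfold Spec_countdiamonds
  exact countdiamonds_eq rows cols lst
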